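-- pv_equiv track=rewrite | github.com/jeffrey-wentz/Binary_Conversion_Calc_v1 | math_functions.py | check_decimal
-- ===== SOURCE A (Python) =====
-- def check_decimal(num):
--     binary = True
--     for i in str(num):
--         # checks if a digit contains only 1 or 0
--         if i in '10':
--             binary = True
--         else:
--             binary = False
--             break
--
--     return binary
-- ===== SOURCE B (Python) =====
-- def check_decimal(num):
--     s = str(num)
--     return not s.replace('0', '').replace('1', '')
-- ===== Notes on version B (the rewrite author's own statement) =====
-- stated objective: simpler
-- what changed: B replaces the per-character scan with a flag and early break by stripping the allowed characters '0' and '1' from str(num) with two whole-string replace passes and testing whether anything is left.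
import Mathlib
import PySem

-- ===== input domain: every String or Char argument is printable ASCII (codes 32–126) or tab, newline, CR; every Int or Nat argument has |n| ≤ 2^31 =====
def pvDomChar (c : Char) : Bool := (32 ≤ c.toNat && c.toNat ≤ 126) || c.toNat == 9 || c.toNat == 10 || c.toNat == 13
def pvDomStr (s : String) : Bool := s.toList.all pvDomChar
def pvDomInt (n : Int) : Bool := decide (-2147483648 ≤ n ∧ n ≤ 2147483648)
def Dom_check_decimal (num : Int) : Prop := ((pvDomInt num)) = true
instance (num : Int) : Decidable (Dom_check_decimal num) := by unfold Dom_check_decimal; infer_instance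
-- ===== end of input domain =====

-- B strips '0' and '1' from str(num) with two replace passes and tests emptiness,
-- instead of A's per-character scan with a flag and early break (objective: simpler).

-- ===== PORT A =====
-- the for-loop: binary is the running flag; 'break' returns immediately with binary = false
def check_decimal_loop : List Char → Bool → Bool
  | [], binary => binary
  | c :: rest, _ => if PySem.Chars.isIn [c] ['1', '0'] then check_decimal_loop rest true else false

def check_decimal (num : Int) : Bool :=
  check_decimal_loop (PySem.Int.toChars num) true

-- ===== PORT B =====
def check_decimal_alt (num : Int) : Bool :=
  let s := PySem.Int.toChars num
  (PySem.Chars.replace (PySem.Chars.replace s ['0'] []) ['1'] []).isEmpty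

-- ===== PRECONDITION & SPEC =====
def Spec_check_decimal (num : Int) (out : Bool) : Prop := out = check_decimal_alt num
instance (num : Int) (out : Bool) : Decidable (Spec_check_decimal num out) := by unfold Spec_check_decimal; infer_instance

-- ===== CLAIM (what is proved, stated in full; the proofs are below) =====
def Claim_equal_check_decimal : Prop := ∀ (num : Int), Dom_check_decimal num → Spec_check_decimal num (check_decimal num)

-- ===== LEMMAS AND PROOFS =====

-- 'i in "10"' for a single character i is membership of that character
theorem isIn_singleton (c : Char) (l : List Char) :
    PySem.Chars.isIn [c] l = l.contains c := by
  by_cases h : c ∈ l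
  · rw [List.contains_eq_mem]
    simp only [h, decide_true]
    rw [PySem.Chars.isIn_iff_infix]
    obtain ⟨s, t, rfl⟩ := List.append_of_mem h
    exact ⟨s, t, by simp⟩
  · rw [List.contains_eq_mem]
    simp only [h, decide_false]
    rw [PySem.Chars.isIn_eq_false_iff]
    intro hinf
    exact h (hinf.mem (by simp))

-- replace's worker with a single deleted character is a filter
theorem go_filter (c : Char) : ∀ (fuel : Nat) (l acc : List Char), l.length ≤ fuel →
    PySem.Chars.replace.go [c] [] fuel l acc = acc.reverse ++ l.filter (fun x => !(x == c)) := by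
  intro fuel
  induction fuel with
  | zero =>
    intro l acc h
    have : l = [] := List.eq_nil_of_length_eq_zero (Nat.le_zero.mp h)
    subst this
    simp [PySem.Chars.replace.go]
  | succ n ih =>
    intro l acc h
    cases l with
    | nil => simp [PySem.Chars.replace.go]
    | cons x t =>
      rw [PySem.Chars.replace.go]
      by_cases hx : x = c
      · subst hx
        simp only [List.isPrefixOf, BEq.rfl, Bool.true_and, if_true, List.length_cons,
          List.length_nil, Nat.zero_add, List.drop_succ_cons, List.drop_zero, List.reverse_nil,
          List.nil_append]
        rw [ih t acc (by simpa using h)]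
        simp
      · have hp : List.isPrefixOf [c] (x :: t) = false := by
          simp [List.isPrefixOf]
          exact fun h' => absurd h'.symm hx
        rw [hp]
        simp only [Bool.false_eq_true, if_false]
        rw [ih t (x :: acc) (by simpa using h)]
        simp [hx]

-- s.replace(c, '') deletes every occurrence of the character c
theorem replace_del (c : Char) (s : List Char) :
    PySem.Chars.replace s [c] [] = s.filter (fun x => !(x == c)) := by
  rw [PySem.Chars.replace]
  simp only [List.isEmpty_cons, Bool.false_eq_true, if_false]
  rw [go_filter c s.length s [] le_rfl]
  simp

-- A's loop (entered with the flag true) agrees with filter-then-emptiness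
theorem loop_eq_filter (l : List Char) :
    check_decimal_loop l true
      = ((l.filter (fun x => !(x == '0'))).filter (fun x => !(x == '1'))).isEmpty := by
  induction l with
  | nil => rfl
  | cons x t ih =>
    rw [check_decimal_loop, isIn_singleton]
    by_cases h1 : x = '1'
    · subst h1; simpa using ih
    · by_cases h0 : x = '0'
      · subst h0; simpa using ih
      · have : (['1', '0'].contains x) = false := by
          simp [List.contains_eq_mem, h1, h0]
        rw [this]
        simp [h0, h1]

-- ===== VERDICT (by name: the statement is the Claim_ definition above) =====
theorem check_decimal_spec : Claim_equal_check_decimal := by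
  intro num _
  unfold Spec_check_decimal check_decimal check_decimal_alt
  simp only [loop_eq_filter, replace_del]
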